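-- pv_equiv track=rewrite | github.com/isinmert/LTL-RL | src/reinforcement_learning/utils.py | _is_condition_satisfied
-- ===== SOURCE A (Python) =====
-- def _is_condition_satisfied(condition, labels):
--     """Returns true if a condition is satisfied by a set of observations. If a condition is empty, it is always
--     true regardless of the observations."""
--     if len(condition) == 0:  # empty conditions = unconditional transition (always taken)
--         return True
--
--     for literal in condition:
--         if literal.startswith('~'):
--             dummy = literal[1:]
--             if dummy in labels:
--                 return False
--         else:
--             dummy = literal
--             if dummy not in labels:
--                 return False
--     return True
-- ===== SOURCE B (Python) =====
-- def _is_condition_satisfied(condition, labels):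
--     # Label-driven evaluation: precompute the forbidden set and the set of
--     # outstanding positive requirements, then scan the LABELS once — a label in
--     # the forbidden set fails immediately, otherwise it crosses off a positive
--     # requirement; the condition holds iff no positive requirement remains.
--     pos, neg = set(), set()
--     for literal in condition:
--         if literal.startswith('~'):
--             neg.add(literal[1:])
--         else:
--             pos.add(literal)
--     for label in labels:
--         if label in neg:
--             return False
--         pos.discard(label)
--     return not pos
-- ===== Notes on version B (the rewrite author's own statement) =====
-- stated objective: alternative
-- what changed: B inverts the traversal: it precomputes forbidden and required-literal sets from the condition and then scans the LABELS once, failing fast on a forbidden label and crossing required labels off, succeeding iff no requirement remains; A loops over the condition testing each literal against labels.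
import Mathlib
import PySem

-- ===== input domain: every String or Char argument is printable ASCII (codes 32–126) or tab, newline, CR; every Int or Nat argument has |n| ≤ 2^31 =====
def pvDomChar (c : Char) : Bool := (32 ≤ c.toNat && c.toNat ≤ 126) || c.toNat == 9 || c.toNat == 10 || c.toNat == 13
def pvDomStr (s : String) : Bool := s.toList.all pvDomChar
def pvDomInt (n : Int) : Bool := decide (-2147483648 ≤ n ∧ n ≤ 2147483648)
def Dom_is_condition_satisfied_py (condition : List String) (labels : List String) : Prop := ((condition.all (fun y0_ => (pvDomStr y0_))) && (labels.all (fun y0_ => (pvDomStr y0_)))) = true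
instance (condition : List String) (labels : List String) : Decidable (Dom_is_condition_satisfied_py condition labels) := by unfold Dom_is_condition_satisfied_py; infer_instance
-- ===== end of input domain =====

-- B inverts the traversal: it precomputes forbidden/required literal sets from the
-- condition, then scans the labels once (objective: alternative; same observable result).

-- ===== PORT A =====
-- A's 'for literal in condition' loop with its early returns
def pvALoop (condition : List String) (labels : List String) : Bool :=
  match condition with
  | [] => true
  | literal :: rest =>
    if PySem.Str.startswith literal "~" then
      if labels.contains (PySem.Str.slice literal (some 1) none) then false
      else pvALoop rest labels
    else
      if !labels.contains literal then false
      else pvALoop rest labels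

def is_condition_satisfied_py (condition : List String) (labels : List String) : Bool :=
  if condition.length == 0 then true
  else pvALoop condition labels

-- ===== PORT B =====
-- the 'for literal in condition' pass building (pos, neg)
def pvBReq (condition : List String) : PySem.Set String × PySem.Set String :=
  condition.foldl
    (fun (pn : PySem.Set String × PySem.Set String) literal =>
      if PySem.Str.startswith literal "~" then
        (pn.1, PySem.Set.add pn.2 (PySem.Str.slice literal (some 1) none))
      else (PySem.Set.add pn.1 literal, pn.2))
    ([], [])

-- the 'for label in labels' scan with early return and the final 'not pos'
def pvBLoop (labels : List String) (neg pos : PySem.Set String) : Bool :=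
  match labels with
  | [] => pos.isEmpty
  | lab :: rest =>
    if PySem.Set.contains neg lab then false
    else pvBLoop rest neg (PySem.Set.discard pos lab)

def is_condition_satisfied_py_alt (condition : List String) (labels : List String) : Bool :=
  let pn := pvBReq condition
  pvBLoop labels pn.2 pn.1

-- ===== PRECONDITION & SPEC =====
def Spec_is_condition_satisfied_py (condition : List String) (labels : List String) (out : Bool) : Prop := out = is_condition_satisfied_py_alt condition labels
instance (condition : List String) (labels : List String) (out : Bool) : Decidable (Spec_is_condition_satisfied_py condition labels out) := by unfold Spec_is_condition_satisfied_py; infer_instance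

-- ===== CLAIM (what is proved, stated in full; the proofs are below) =====
def Claim_equal_is_condition_satisfied_py : Prop := ∀ (condition : List String) (labels : List String), Dom_is_condition_satisfied_py condition labels → Spec_is_condition_satisfied_py condition labels (is_condition_satisfied_py condition labels)

-- ===== LEMMAS AND PROOFS =====

-- B's label scan equals two bulk membership checks
theorem pvBLoop_eq (labels : List String) (neg pos : PySem.Set String) :
    pvBLoop labels neg pos
      = (labels.all (fun l => !(neg.contains l)) && pos.all (fun p => labels.contains p)) := by
  induction labels generalizing pos with
  | nil => cases pos <;> simp [pvBLoop]
  | cons lab rest ih =>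
    simp only [pvBLoop]
    by_cases h : lab ∈ neg
    · simp [PySem.Set.contains, h]
    · rw [if_neg (by simp [PySem.Set.contains, h]), ih, Bool.eq_iff_iff]
      simp only [Bool.and_eq_true, List.all_eq_true, List.all_cons,
        PySem.Set.mem_discard, Bool.not_eq_true', List.contains_eq_mem, decide_eq_true_eq]
      constructor
      · rintro ⟨hn, hp⟩
        refine ⟨⟨by simpa using h, hn⟩, fun p hpmem => ?_⟩
        by_cases he : p = lab
        · exact List.mem_cons.mpr (Or.inl he)
        · exact List.mem_cons.mpr (Or.inr (hp p ⟨hpmem, he⟩))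
      · rintro ⟨⟨_, hn⟩, hp⟩
        refine ⟨hn, fun p hpd => ?_⟩
        rcases List.mem_cons.mp (hp p hpd.1) with he | hr
        · exact absurd he hpd.2
        · exact hr

-- membership in the two requirement sets built by pvBReq's fold
theorem pvBReq_mem (cond : List String) (pn : PySem.Set String × PySem.Set String) (x : String) :
    (x ∈ (cond.foldl
        (fun (pn : PySem.Set String × PySem.Set String) literal =>
          if PySem.Str.startswith literal "~" then
            (pn.1, PySem.Set.add pn.2 (PySem.Str.slice literal (some 1) none))
          else (PySem.Set.add pn.1 literal, pn.2)) pn).1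
      ↔ x ∈ pn.1 ∨ (x ∈ cond ∧ ¬ PySem.Str.startswith x "~" = true)) ∧
    (x ∈ (cond.foldl
        (fun (pn : PySem.Set String × PySem.Set String) literal =>
          if PySem.Str.startswith literal "~" then
            (pn.1, PySem.Set.add pn.2 (PySem.Str.slice literal (some 1) none))
          else (PySem.Set.add pn.1 literal, pn.2)) pn).2
      ↔ x ∈ pn.2 ∨ ∃ e ∈ cond, PySem.Str.startswith e "~" = true ∧ x = PySem.Str.slice e (some 1) none) := by
  induction cond generalizing pn with
  | nil => simp
  | cons e rest ih =>
    simp only [List.foldl_cons]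
    by_cases h : PySem.Str.startswith e "~" = true
    · rw [if_pos h]
      rcases ih (pn.1, PySem.Set.add pn.2 (PySem.Str.slice e (some 1) none)) with ⟨ih1, ih2⟩
      constructor
      · rw [ih1]
        constructor
        · rintro (hi | ⟨hm, hs⟩)
          · exact Or.inl hi
          · exact Or.inr ⟨List.mem_cons_of_mem _ hm, hs⟩
        · rintro (hi | ⟨hm, hs⟩)
          · exact Or.inl hi
          · rcases List.mem_cons.mp hm with rfl | hm'
            · exact absurd h hs
            · exact Or.inr ⟨hm', hs⟩
      · rw [ih2]
        simp only [PySem.Set.mem_add]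
        constructor
        · rintro ((hi | rfl) | ⟨f, hf, hsf, hx⟩)
          · exact Or.inl hi
          · exact Or.inr ⟨e, List.mem_cons_self, h, rfl⟩
          · exact Or.inr ⟨f, List.mem_cons_of_mem _ hf, hsf, hx⟩
        · rintro (hi | ⟨f, hf, hsf, hx⟩)
          · exact Or.inl (Or.inl hi)
          · rcases List.mem_cons.mp hf with rfl | hf'
            · exact Or.inl (Or.inr hx)
            · exact Or.inr ⟨f, hf', hsf, hx⟩
    · rw [if_neg h]
      rcases ih (PySem.Set.add pn.1 e, pn.2) with ⟨ih1, ih2⟩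
      constructor
      · rw [ih1]
        simp only [PySem.Set.mem_add]
        constructor
        · rintro ((hi | rfl) | ⟨hm, hs⟩)
          · exact Or.inl hi
          · exact Or.inr ⟨List.mem_cons_self, h⟩
          · exact Or.inr ⟨List.mem_cons_of_mem _ hm, hs⟩
        · rintro (hi | ⟨hm, hs⟩)
          · exact Or.inl (Or.inl hi)
          · rcases List.mem_cons.mp hm with rfl | hm'
            · exact Or.inl (Or.inr rfl)
            · exact Or.inr ⟨hm', hs⟩
      · rw [ih2]
        constructor
        · rintro (hi | ⟨f, hf, hsf, hx⟩)
          · exact Or.inl hi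
          · exact Or.inr ⟨f, List.mem_cons_of_mem _ hf, hsf, hx⟩
        · rintro (hi | ⟨f, hf, hsf, hx⟩)
          · exact Or.inl hi
          · rcases List.mem_cons.mp hf with rfl | hf'
            · exact absurd hsf h
            · exact Or.inr ⟨f, hf', hsf, hx⟩

-- the positive requirement set of pvBReq
theorem pvBReq_fst (cond : List String) (x : String) :
    x ∈ (pvBReq cond).1 ↔ x ∈ cond ∧ ¬ PySem.Str.startswith x "~" = true := by
  have h := (pvBReq_mem cond ([], []) x).1
  simpa [pvBReq] using h

-- the forbidden set of pvBReq
theorem pvBReq_snd (cond : List String) (x : String) :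
    x ∈ (pvBReq cond).2 ↔ ∃ e ∈ cond, PySem.Str.startswith e "~" = true ∧ x = PySem.Str.slice e (some 1) none := by
  have h := (pvBReq_mem cond ([], []) x).2
  simpa [pvBReq] using h

-- A's loop as a bulk check over the condition
theorem pvALoop_eq (cond labels : List String) :
    pvALoop cond labels
      = cond.all (fun l => if PySem.Str.startswith l "~"
          then !(labels.contains (PySem.Str.slice l (some 1) none))
          else labels.contains l) := by
  induction cond with
  | nil => simp [pvALoop]
  | cons l rest ih =>
    simp only [pvALoop, List.all_cons]
    by_cases h : PySem.Str.startswith l "~" = true <;>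
      by_cases hc : PySem.Str.slice l (some 1) none ∈ labels <;>
      by_cases hc2 : l ∈ labels <;>
      simp [PySem.Str.startswith, PySem.Str.startswith] at h <;>
      simp [PySem.Str.startswith, h, hc, hc2, ih]

-- ===== VERDICT (by name: the statement is the Claim_ definition above) =====
theorem is_condition_satisfied_py_spec : Claim_equal_is_condition_satisfied_py := by
  intro cond labels _
  unfold Spec_is_condition_satisfied_py is_condition_satisfied_py is_condition_satisfied_py_alt
  rw [pvBLoop_eq]
  cases cond with
  | nil => simp [pvBReq]
  | cons c0 crest =>
    rw [if_neg (by simp), pvALoop_eq, Bool.eq_iff_iff]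
    simp only [Bool.and_eq_true, List.all_eq_true]
    constructor
    · intro H
      refine ⟨fun lab hlab => ?_, fun p hp => ?_⟩
      · by_cases hneg : lab ∈ (pvBReq (c0 :: crest)).2
        · rcases (pvBReq_snd _ _).mp hneg with ⟨e, he, hse, hx⟩
          have h2 := H e he
          rw [if_pos hse] at h2
          simp only [Bool.not_eq_true'] at h2
          have hm2 : PySem.Str.slice e (some 1) none ∈ labels := hx ▸ hlab
          simp [hm2] at h2
        · simpa using hneg
      · have hp' := (pvBReq_fst _ _).mp hp
        have h2 := H p hp'.1
        rw [if_neg hp'.2] at h2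
        exact h2
    · rintro ⟨hneg, hpos⟩ l hl
      by_cases h : PySem.Str.startswith l "~" = true
      · rw [if_pos h]
        have hnot : PySem.Str.slice l (some 1) none ∉ labels := by
          intro habs
          have h3 := hneg _ habs
          simp [(pvBReq_snd (c0 :: crest) _).mpr ⟨l, hl, h, rfl⟩] at h3
        simpa using hnot
      · rw [if_neg h]
        have h4 := hpos _ ((pvBReq_fst (c0 :: crest) _).mpr ⟨hl, h⟩)
        simpa using h4
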